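-- pv_equiv track=rewrite | github.com/miliar/Code_Jam_Webscraper | solutions_python/Problem_130/68.py | worst
-- ===== SOURCE A (Python) =====
-- def worst(i, n):
--     result = 0
--     left = i
--     for i in range(n):
--         if(left > 0):
--             result |= 1 << (n - i - 1)
--         else:
--             return result + 1
--         left -= 1
--         left >>= 1
--     return result + 1
-- ===== SOURCE B (Python) =====
-- def worst(i, n):
--     if i <= 0 or n <= 0:
--         return 1
--     k = min(n, (i + 1).bit_length() - 1)
--     return 2 ** n - 2 ** (n - k) + 1
-- ===== Notes on version B (the rewrite author's own statement) =====
-- stated objective: faster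
-- what changed: Replaced the bit-by-bit loop (set top bit, halve counter, repeat n times) with a closed-form formula: the number of bits set is k = min(n, (i+1).bit_length()-1), so the answer is 2**n - 2**(n-k) + 1 with no loop.
import Mathlib
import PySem

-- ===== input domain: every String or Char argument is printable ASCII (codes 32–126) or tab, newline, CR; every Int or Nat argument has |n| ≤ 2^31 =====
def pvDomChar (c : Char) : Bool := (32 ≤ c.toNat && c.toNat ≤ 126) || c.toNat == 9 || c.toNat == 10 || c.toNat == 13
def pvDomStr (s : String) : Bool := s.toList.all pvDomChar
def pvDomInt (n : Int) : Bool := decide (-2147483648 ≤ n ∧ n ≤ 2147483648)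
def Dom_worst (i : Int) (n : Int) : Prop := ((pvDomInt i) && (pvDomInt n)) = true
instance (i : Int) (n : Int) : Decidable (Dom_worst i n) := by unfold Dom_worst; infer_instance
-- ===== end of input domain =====

-- B replaces A's per-bit loop by a closed-form formula for the number of top bits set (no loop).


-- ===== PORT A =====
-- the 'for i in range(n)' loop; inside it 0 ≤ j < n, so the shift count n - j - 1 is nonnegative and .toNat is exact
def worstLoop (n : Int) : List Int → Int → Int → Int
  | [], result, _ => result + 1
  | j :: rest, result, left =>
    if left > 0 then
      worstLoop n rest (PySem.Int.bor result ((1 : Int) <<< (n - j - 1).toNat))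
        ((left - 1) >>> (1 : Nat))
    else
      result + 1

def worst (i : Int) (n : Int) : Int :=
  worstLoop n (PySem.List.pyRange 0 n 1) 0 i

-- ===== PORT B =====
-- (i+1).bit_length() is PySem.Int.bitLength (i+1); here i ≥ 1 so 1 ≤ k ≤ n and both exponents are nonnegative, .toNat exact
def worst_alt (i : Int) (n : Int) : Int :=
  if i ≤ 0 ∨ n ≤ 0 then 1
  else
    2 ^ n.toNat - 2 ^ (n - min n ((PySem.Int.bitLength (i + 1) : Int) - 1)).toNat + 1

-- ===== PRECONDITION & SPEC =====
def Spec_worst (i : Int) (n : Int) (out : Int) : Prop := out = worst_alt i n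
instance (i : Int) (n : Int) (out : Int) : Decidable (Spec_worst i n out) := by unfold Spec_worst; infer_instance

-- ===== CLAIM (what is proved, stated in full; the proofs are below) =====
def Claim_equal_worst : Prop := ∀ (i : Int) (n : Int), Dom_worst i n → Spec_worst i n (worst i n)

-- ===== LEMMAS AND PROOFS =====

-- the number of iterations A's counter stays positive, as a function of the current counter
def klog (left : Int) : Nat := if left ≤ 0 then 0 else PySem.Int.bitLength (left + 1) - 1

theorem bitLength_pos {x : Int} (h : 0 < x) : 1 ≤ PySem.Int.bitLength x := by
  rw [PySem.Int.bitLength_of_pos h]; omega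

theorem klog_pos_step {left : Int} (h : 0 < left) :
    klog left = klog ((left - 1) >>> (1 : Nat)) + 1 := by
  have hs : (left - 1) >>> (1 : Nat) = (left - 1) / 2 := by
    simp [Int.shiftRight_eq_div_pow]
  have hfd : PySem.Int.floordiv (left + 1) 2 = (left - 1) / 2 + 1 := by
    rw [PySem.Int.floordiv_eq_ediv_of_pos (by omega)]; omega
  have hbl : PySem.Int.bitLength (left + 1)
      = PySem.Int.bitLength ((left - 1) / 2 + 1) + 1 := by
    rw [PySem.Int.bitLength_of_pos (by omega), hfd]
  rcases (by omega : (left - 1) / 2 ≤ 0 ∨ 0 < (left - 1) / 2) with h0 | h0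
  · have h0' : (left - 1) / 2 = 0 := by omega
    rw [h0'] at hbl
    have hone : PySem.Int.bitLength ((0:Int) + 1) = 1 := by decide
    unfold klog
    rw [hs, h0', if_neg (by omega), if_pos le_rfl, hbl, hone]
  · have h1 : 1 ≤ PySem.Int.bitLength ((left - 1) / 2 + 1) := bitLength_pos (by omega)
    unfold klog
    rw [hs, if_neg (by omega), if_neg (by omega), hbl]
    omega

-- disjoint-bit OR is addition: (2^p - 2^(q+1)) | 2^q = 2^p - 2^q for q < p
theorem bor_top_bits (p q : Nat) (h : q < p) :
    PySem.Int.bor ((2 : Int) ^ p - 2 ^ (q + 1)) ((2 : Int) ^ q) = 2 ^ p - 2 ^ q := by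
  have hle1 : (2:Nat) ^ (q+1) ≤ 2 ^ p := Nat.pow_le_pow_right (by norm_num) (by omega)
  have hle2 : (2:Nat) ^ q ≤ 2 ^ p := Nat.pow_le_pow_right (by norm_num) (by omega)
  have c1 : (2 : Int) ^ p - 2 ^ (q + 1) = (((2 ^ p - 2 ^ (q+1) : Nat)) : Int) := by
    push_cast [Nat.cast_sub hle1]; ring
  have c2 : (2 : Int) ^ q = (((2 ^ q : Nat)) : Int) := by push_cast; ring
  have c3 : (2 : Int) ^ p - 2 ^ q = (((2 ^ p - 2 ^ q : Nat)) : Int) := by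
    push_cast [Nat.cast_sub hle2]; ring
  rw [c1, c3, c2, PySem.Int.bor_natCast]
  congr 1
  have e1 : (2:Nat) ^ p - 2 ^ (q+1) = (2 ^ (p - (q+1)) - 1) <<< (q+1) := by
    rw [Nat.shiftLeft_eq, Nat.sub_mul, Nat.pow_sub_mul_pow 2 (by omega : q+1 ≤ p)]; ring_nf
  have e2 : (2:Nat) ^ p - 2 ^ q = (2 ^ (p - q) - 1) <<< q := by
    rw [Nat.shiftLeft_eq, Nat.sub_mul, Nat.pow_sub_mul_pow 2 (by omega : q ≤ p)]; ring_nf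
  apply Nat.eq_of_testBit_eq
  intro i
  rw [Nat.testBit_lor, e1, e2, Nat.testBit_shiftLeft, Nat.testBit_shiftLeft,
    Nat.testBit_two_pow_sub_one, Nat.testBit_two_pow_sub_one, Nat.testBit_two_pow]
  simp only [← Bool.decide_and, ← Bool.decide_or, decide_eq_decide]
  omega

theorem loop_eq (nn : Nat) :
    ∀ (m : Nat) (left : Int), m ≤ nn →
      worstLoop (nn : Int) (PySem.List.pyRange ((nn : Int) - m) nn 1)
        ((2 : Int) ^ nn - 2 ^ m) left
      = 2 ^ nn - 2 ^ (m - min m (klog left)) + 1 := by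
  intro m
  induction m with
  | zero =>
    intro left _
    push_cast
    rw [show ((nn : Int) - 0) = (nn : Int) by ring,
      PySem.List.pyRange_one_eq_nil le_rfl]
    simp [worstLoop]
  | succ m ih =>
    intro left hm
    push_cast
    rw [PySem.List.pyRange_one_cons (by omega : (nn : Int) - (m+1) < nn)]
    show (if left > 0 then _ else _) = _
    by_cases hl : left > 0
    · rw [if_pos hl]
      have hexp : ((nn : Int) - ((nn : Int) - (m + 1)) - 1).toNat = m := by omega
      have hsh : (1 : Int) <<< m = 2 ^ m := by simp [Int.shiftLeft_eq]
      have hnext : (nn : Int) - (m + 1) + 1 = (nn : Int) - m := by ring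
      rw [hexp, hsh, bor_top_bits nn m (by omega), hnext, ih _ (by omega),
        klog_pos_step hl]
      have heq : m + 1 - min (m + 1) (klog ((left - 1) >>> (1:Nat)) + 1)
          = m - min m (klog ((left - 1) >>> (1:Nat))) := by omega
      rw [heq]
    · rw [if_neg hl]
      have hk : klog left = 0 := by unfold klog; rw [if_pos (by omega)]
      rw [hk]
      simp

-- ===== VERDICT (by name: the statement is the Claim_ definition above) =====
theorem worst_spec : Claim_equal_worst := by
  intro i n _
  unfold Spec_worst worst worst_alt
  rcases (by omega : n ≤ 0 ∨ 0 < n) with hn | hn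
  · rw [PySem.List.pyRange_one_eq_nil hn, if_pos (Or.inr hn)]
    rfl
  · have hnn : ((n.toNat : Nat) : Int) = n := Int.toNat_of_nonneg (by omega)
    have hL := loop_eq n.toNat n.toNat i le_rfl
    simp only [sub_self] at hL
    rw [← hnn, hL]
    by_cases hi : i ≤ 0
    · rw [if_pos (Or.inl hi)]
      have hk : klog i = 0 := by unfold klog; rw [if_pos hi]
      rw [hk]
      simp
    · rw [if_neg (by omega)]
      have hbl : 1 ≤ PySem.Int.bitLength (i + 1) := bitLength_pos (by omega)
      have hk : klog i = PySem.Int.bitLength (i + 1) - 1 := by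
        unfold klog; rw [if_neg hi]
      rw [hk]
      have hexp : (((n.toNat : Nat) : Int) - min ((n.toNat : Nat) : Int)
          ((PySem.Int.bitLength (i + 1) : Int) - 1)).toNat
          = n.toNat - min n.toNat (PySem.Int.bitLength (i + 1) - 1) := by
        omega
      rw [hexp, Int.toNat_natCast]
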